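-- pv_equiv track=rewrite | github.com/wormhole2080/AoC | 2023_11.py | insert_rows
-- ===== SOURCE A (Python) =====
-- def insert_rows(universe):
--     empty = '.' * len(universe[0])
--     flag_empty = False
--     empty_lines = []
--
--     for x, line in enumerate(universe):
--         if flag_empty == True:
--             flag_empty = False
--             continue
--
--         if not any('#' in i for i in enumerate(line)):
--             universe.insert(x,[*empty])
--             flag_empty = True
--             empty_lines.append(x)
--
--     return universe, empty_lines
-- ===== SOURCE B (Python) =====
-- def insert_rows(universe):
--     width = len(universe[0])
--     empty_lines = []
--     result = []
--     for row in universe: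
--         if '#' not in row:
--             empty_lines.append(len(result))
--             result.append([*('.' * width)])
--         result.append(row)
--     universe[:] = result
--     return universe, empty_lines
-- ===== Notes on version B (the rewrite author's own statement) =====
-- stated objective: simpler
-- what changed: A mutates the list while enumerating it, inserting dots rows and using a flag/continue to skip the row the insertion pushed forward; B does one plain forward pass that accumulates a fresh result list (appending a dots row before each empty row and recording its index as len(result)) and writes it back with universe[:] = result.
import Mathlib
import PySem

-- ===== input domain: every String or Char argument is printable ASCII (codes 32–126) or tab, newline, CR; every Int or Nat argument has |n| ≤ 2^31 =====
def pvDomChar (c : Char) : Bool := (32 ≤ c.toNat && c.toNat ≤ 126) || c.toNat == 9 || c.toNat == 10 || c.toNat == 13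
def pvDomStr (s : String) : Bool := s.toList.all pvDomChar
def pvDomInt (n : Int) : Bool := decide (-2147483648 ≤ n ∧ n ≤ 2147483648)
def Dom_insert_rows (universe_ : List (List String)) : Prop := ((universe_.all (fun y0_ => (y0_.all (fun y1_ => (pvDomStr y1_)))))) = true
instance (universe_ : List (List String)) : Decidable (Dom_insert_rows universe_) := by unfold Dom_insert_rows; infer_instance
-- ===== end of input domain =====

-- B replaces A's insert-during-enumerate loop (with a skip flag) by a single
-- forward pass that builds a fresh list; same return value (A also mutates its
-- argument in place; B's `universe[:] = result` reproduces that mutation).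

-- ===== PORT A =====
-- Python's `for x, line in enumerate(universe)` over a list that is mutated
-- during iteration: CPython re-reads the (possibly grown) list at each index,
-- so it is the loop `while x < len(universe): line = universe[x]; …; x += 1`.
-- `any('#' in i for i in enumerate(line))`: each `i` is a pair (int, str), and
-- `'#' in (k, s)` is tuple membership, true iff s == '#' (the int never equals a str).
-- `empty = '.' * len(universe[0])`, `[*empty]` = that many singleton "." strings.
def insertRowsLoop (emptyRow : List String) (u : List (List String)) (x : Nat)
    (flagEmpty : Bool) (emptyLines : List Int) : List (List String) × List Int :=
  if h : x < u.length then
    if flagEmpty then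
      insertRowsLoop emptyRow u (x + 1) false emptyLines
    else if (PySem.List.enumerate u[x] 0).any (fun p => p.2 == "#") then
      insertRowsLoop emptyRow u (x + 1) false emptyLines
    else
      insertRowsLoop emptyRow (PySem.List.insert u (x : Int) emptyRow) (x + 1) true
        (emptyLines ++ [(x : Int)])
  else (u, emptyLines)
termination_by 2 * (u.length - x) + (if flagEmpty then 0 else 1)
decreasing_by
  all_goals simp_all [PySem.List.length_insert]
  all_goals omega

def insert_rows (universe_ : List (List String)) : List (List String) × List Int :=
  match PySem.List.pyGet? universe_ 0 with
  | none => ([], [])  -- universe[0] raises IndexError in Python; excluded by Pre_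
  | some row0 => insertRowsLoop (List.replicate row0.length ".") universe_ 0 false []

-- ===== PORT B =====
-- loop body of Source B: maybe record len(result) and append a dots row, then append the row
def insertRowsStep (width : Nat) (acc : List (List String) × List Int)
    (row : List String) : List (List String) × List Int :=
  let acc2 := if row.contains "#" then acc
              else (acc.1 ++ [List.replicate width "."], acc.2 ++ [(acc.1.length : Int)])
  (acc2.1 ++ [row], acc2.2)

def insert_rows_alt (universe_ : List (List String)) : List (List String) × List Int :=
  match PySem.List.pyGet? universe_ 0 with
  | none => ([], [])  -- len(universe[0]) raises IndexError in Python; excluded by Pre_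
  | some row0 => universe_.foldl (insertRowsStep row0.length) ([], [])

-- ===== PRECONDITION & SPEC =====
-- Pre_ excludes only the empty list, on which both Pythons raise IndexError.
def Pre_insert_rows (universe_ : List (List String)) : Prop := universe_ ≠ []
instance (universe_ : List (List String)) : Decidable (Pre_insert_rows universe_) := by
  unfold Pre_insert_rows; infer_instance
def pvWitness_insert_rows : List (List String) := [["#", "."], [".", "."]]

def Spec_insert_rows (universe_ : List (List String)) (out : List (List String) × List Int) : Prop := out = insert_rows_alt universe_
instance (universe_ : List (List String)) (out : List (List String) × List Int) : Decidable (Spec_insert_rows universe_ out) := by unfold Spec_insert_rows; infer_instance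

-- ===== CLAIM (what is proved, stated in full; the proofs are below) =====
def Claim_equal_insert_rows : Prop := ∀ (universe_ : List (List String)), Dom_insert_rows universe_ → Pre_insert_rows universe_ → Spec_insert_rows universe_ (insert_rows universe_)

-- ===== LEMMAS AND PROOFS =====

-- A's `any('#' in i for i in enumerate(line))` is just `'#' in line`
lemma any_enumerate_hash (row : List String) (s : Int) :
    (PySem.List.enumerate row s).any (fun p => p.2 == "#") = row.contains "#" := by
  induction row generalizing s with
  | nil => simp [PySem.List.enumerate_nil]
  | cons r rs ih =>
      by_cases h : r = "#"
      · simp [PySem.List.enumerate_cons, ih, h]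
      · simp [PySem.List.enumerate_cons, ih, h, Ne.symm h]

-- the loop of A, started at index |pre| on pre ++ rest with the flag down,
-- processes exactly `rest`, doing per row what B's fold step does
lemma insertRowsLoop_eq_foldl (width : Nat) :
    ∀ (rest pre : List (List String)) (el : List Int),
      insertRowsLoop (List.replicate width ".") (pre ++ rest) pre.length false el
        = rest.foldl (insertRowsStep width) (pre, el) := by
  intro rest
  induction rest with
  | nil =>
      intro pre el
      rw [insertRowsLoop]
      simp
  | cons r rs ih =>
      intro pre el
      rw [insertRowsLoop]
      have hx : pre.length < (pre ++ r :: rs).length := by simp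
      have hget : (pre ++ r :: rs)[pre.length]'hx = r := by
        simp [List.getElem_append_right]
      simp only [dif_pos hx, if_neg (Bool.false_ne_true), hget, any_enumerate_hash]
      by_cases hc : "#" ∈ r
      · rw [if_pos (by simpa using hc)]
        have : pre ++ r :: rs = (pre ++ [r]) ++ rs := by simp
        rw [this]
        have hl : pre.length + 1 = (pre ++ [r]).length := by simp
        rw [hl, ih (pre ++ [r]) el]
        simp [List.foldl_cons, insertRowsStep, hc]
      · rw [if_neg (by simpa using hc)]
        have hins : PySem.List.insert (pre ++ r :: rs) (pre.length : Int)
            (List.replicate width ".") = (pre ++ [List.replicate width ".", r]) ++ rs := by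
          rw [PySem.List.insert_natCast _ _ _ (by simp)]
          simp
        rw [hins, insertRowsLoop]
        have hx2 : pre.length + 1 < ((pre ++ [List.replicate width ".", r]) ++ rs).length := by
          simp
        simp only [dif_pos hx2, if_pos]
        have hl2 : pre.length + 1 + 1 = (pre ++ [List.replicate width ".", r]).length := by
          simp
        rw [hl2, ih (pre ++ [List.replicate width ".", r]) (el ++ [(pre.length : Int)])]
        simp [List.foldl_cons, insertRowsStep, hc]

-- ===== VERDICT (by name: the statement is the Claim_ definition above) =====
theorem insert_rows_spec : Claim_equal_insert_rows := by
  intro universe_ _ hpre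
  unfold Spec_insert_rows insert_rows insert_rows_alt
  match hu : universe_, hpre with
  | r0 :: rest, _ =>
      simp only [PySem.List.pyGet?_zero_cons]
      have := insertRowsLoop_eq_foldl r0.length (r0 :: rest) [] []
      simpa using this
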